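-- pv_equiv track=rewrite | github.com/daydream2002/shichuanrl | interface/sichuanMJ/bak/sichuanMJ.py | is_related
-- ===== SOURCE A (Python) =====
-- def is_related(card=[], ndCards=[]):
--     """
--     功能：判断孤张牌是否与次级废牌能成为搭子２Ｎ关系
--     思路：先计算该张废牌的相关牌为临近２张牌，判断其是否在次级废牌中ndCards
--     :param card: 废牌
--     :param ndCards: 次级废牌组合
--     :return: bool
--     """
--     if card > 0x30:
--         return False
--     relatedSet = [card - 2, card - 1, card, card + 1, card + 2]
--     for card in relatedSet:
--         if card in ndCards:
--             return True
--     return False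
-- ===== SOURCE B (Python) =====
-- def is_related(card=[], ndCards=[]):
--     if card > 0x30:
--         return False
--     for nd in ndCards:
--         if abs(nd - card) <= 2:
--             return True
--     return False
-- ===== Notes on version B (the rewrite author's own statement) =====
-- stated objective: alternative
-- what changed: Instead of building the 5-element neighbour set and testing each candidate's membership in ndCards, B scans ndCards once and returns True as soon as some element lies within distance 2 of card.
import Mathlib
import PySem

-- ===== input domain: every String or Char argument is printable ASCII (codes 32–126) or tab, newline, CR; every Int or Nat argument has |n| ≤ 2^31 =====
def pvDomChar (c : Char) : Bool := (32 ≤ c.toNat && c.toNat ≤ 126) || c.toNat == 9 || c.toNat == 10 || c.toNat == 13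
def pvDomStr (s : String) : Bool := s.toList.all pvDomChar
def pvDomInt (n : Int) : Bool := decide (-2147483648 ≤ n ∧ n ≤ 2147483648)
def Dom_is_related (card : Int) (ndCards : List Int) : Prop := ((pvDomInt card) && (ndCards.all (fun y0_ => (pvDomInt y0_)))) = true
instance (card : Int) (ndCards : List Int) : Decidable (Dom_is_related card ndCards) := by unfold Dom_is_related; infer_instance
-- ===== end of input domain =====

-- B replaces A's fixed 5-candidate membership scan by a single pass over ndCards testing |nd - card| <= 2 (alternative decomposition, same cost).


-- ===== PORT A =====
def is_related (card : Int) (ndCards : List Int) : Bool :=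
  if card > 0x30 then false
  else
    -- for card in relatedSet: if card in ndCards: return True / return False
    [card - 2, card - 1, card, card + 1, card + 2].any (fun c => ndCards.contains c)

-- ===== PORT B =====
-- B: single pass over ndCards, early return when |nd - card| <= 2
def is_related_alt (card : Int) (ndCards : List Int) : Bool :=
  if card > 0x30 then false
  else ndCards.any (fun nd => (nd - card).natAbs ≤ 2)

-- ===== PRECONDITION & SPEC =====
def Spec_is_related (card : Int) (ndCards : List Int) (out : Bool) : Prop := out = is_related_alt card ndCards
instance (card : Int) (ndCards : List Int) (out : Bool) : Decidable (Spec_is_related card ndCards out) := by unfold Spec_is_related; infer_instance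

-- ===== CLAIM (what is proved, stated in full; the proofs are below) =====
def Claim_equal_is_related : Prop := ∀ (card : Int) (ndCards : List Int), Dom_is_related card ndCards → Spec_is_related card ndCards (is_related card ndCards)

-- ===== LEMMAS AND PROOFS =====

-- ===== VERDICT (by name: the statement is the Claim_ definition above) =====
theorem is_related_spec : Claim_equal_is_related := by
  intro card ndCards _
  unfold Spec_is_related is_related is_related_alt
  split
  · rfl
  · rw [Bool.eq_iff_iff]
    simp only [List.any_eq_true, List.contains_eq_mem, List.mem_cons,
      List.not_mem_nil, decide_eq_true_eq]
    constructor
    · rintro ⟨r, hr, hmem⟩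
      exact ⟨r, hmem, by simp at hr; omega⟩
    · rintro ⟨x, hx, habs⟩
      refine ⟨x, ?_, hx⟩
      simp
      omega
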